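-- pv_equiv track=rewrite | github.com/nec-research/gradpath | gradpath_explanations.py | find_paths_and_triples
-- ===== SOURCE A (Python) =====
-- from collections import defaultdict
--
-- def find_paths_and_triples(lookup_table, start, end, nodelimit=4, path=[], triples_start=[],
--                            triples_path=[]):
--     path = path + [start]
--     if len(triples_start) > 0:
--         triples_path = triples_path + [triples_start]
--
--     if len(path) >= nodelimit and start != end:
--         return [], []
--     if start == end:
--         return [path], [triples_path]
--
--     paths = []
--     triples_paths = []
--
--     # Get next nodes connecting start, direction is not considered.
--     # This means start can be subject or object of a triple.
--     # There might be multiple triples between start and another node.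
--     triples_relate_start = lookup_table['e:' + start]
--     next_nodes = defaultdict(list)
--     for triple in triples_relate_start:
--         tem = triple.split(':')
--         e = set([tem[0], tem[2]]) - {start}
--         if len(e) > 0:
--             next_nodes[next(iter(e))].append(triple)
--
--     for node in next_nodes.keys():
--         if node not in path:
--             # newpaths = find_simple_paths(lookup_table, node, end, nodelimit, path)
--             newpaths, newtriples_paths = find_paths_and_triples(lookup_table, node, end, nodelimit,
--                                                                 path, next_nodes[node],
--                                                                 triples_path)
--             for newpath in newpaths:
--                 paths.append(newpath)
--             for newtriples_path in newtriples_paths: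
--                 triples_paths.append(newtriples_path)
--     return paths, triples_paths
-- ===== SOURCE B (Python) =====
-- def find_paths_and_triples(lookup_table, start, end, nodelimit=4, path=[], triples_start=[],
--                            triples_path=[]):
--     paths = []
--     triples_paths = []
--     # iterative DFS with an explicit stack of frames (node, path-so-far, incoming triples, triples-path)
--     stack = [(start, path, triples_start, triples_path)]
--     while stack:
--         node, p, inc, tp = stack.pop()
--         p = p + [node]
--         if len(inc) > 0:
--             tp = tp + [inc]
--         if len(p) >= nodelimit and node != end:
--             continue
--         if node == end:
--             paths.append(p)
--             triples_paths.append(tp)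
--             continue
--         next_nodes = {}
--         for triple in lookup_table['e:' + node]:
--             tem = triple.split(':')
--             e = set([tem[0], tem[2]]) - {node}
--             if len(e) > 0:
--                 n = next(iter(e))
--                 next_nodes[n] = next_nodes.get(n, []) + [triple]
--         # push unvisited neighbours in reverse insertion order so they pop leftmost-first
--         for n in reversed(list(next_nodes)):
--             if n not in p:
--                 stack.append((n, p, next_nodes[n], tp))
--     return paths, triples_paths
-- ===== Notes on version B (the rewrite author's own statement) =====
-- stated objective: alternative
-- what changed: The recursive path enumeration is replaced by an iterative depth-first search over an explicit stack of (node, path, incoming_triples, triples_path) frames, pushing unvisited neighbours in reverse insertion order so results are collected in pop order instead of by recursive list-appending.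
import Mathlib
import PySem

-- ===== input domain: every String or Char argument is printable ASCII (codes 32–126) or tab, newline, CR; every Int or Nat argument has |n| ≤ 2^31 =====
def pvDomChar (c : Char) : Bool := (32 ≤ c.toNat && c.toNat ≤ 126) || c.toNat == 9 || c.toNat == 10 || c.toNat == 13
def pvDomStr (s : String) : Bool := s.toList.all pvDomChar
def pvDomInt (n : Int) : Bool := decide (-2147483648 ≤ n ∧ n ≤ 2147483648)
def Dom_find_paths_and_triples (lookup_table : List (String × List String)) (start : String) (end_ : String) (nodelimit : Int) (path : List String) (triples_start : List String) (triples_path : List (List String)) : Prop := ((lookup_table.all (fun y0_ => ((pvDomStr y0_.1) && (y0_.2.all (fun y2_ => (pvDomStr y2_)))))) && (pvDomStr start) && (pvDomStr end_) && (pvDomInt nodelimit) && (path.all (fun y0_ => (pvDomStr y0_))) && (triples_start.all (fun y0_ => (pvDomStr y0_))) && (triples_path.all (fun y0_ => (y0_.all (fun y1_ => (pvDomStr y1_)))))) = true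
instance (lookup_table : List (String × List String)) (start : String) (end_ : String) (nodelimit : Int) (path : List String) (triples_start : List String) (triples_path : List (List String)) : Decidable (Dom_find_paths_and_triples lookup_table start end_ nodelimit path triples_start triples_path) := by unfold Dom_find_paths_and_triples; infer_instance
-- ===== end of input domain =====

-- B replaces A's recursion by an iterative DFS over an explicit stack of frames (same return value; neither mutates its arguments).

-- shared helper: grouping of triples by "other endpoint" (both Pythons build this dict identically)
def pvParts (t : String) : List String := (PySem.Str.split? t ":").getD []

def pvNextNodes (trs : List String) (node : String) : PySem.Dict String (List String) :=
  trs.foldl (fun d t =>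
    let tem := pvParts t
    -- tem.getD 2 "" : Python tem[2] raises IndexError when the triple has fewer than 3 fields; Pre_ excludes that
    let e := PySem.Set.diff (PySem.Set.ofList [tem.getD 0 "", tem.getD 2 ""]) [node]
    match e with
    | [] => d
    | n :: _ => d.modify n [] (· ++ [t]))   -- next(iter(e)): deterministic under Pre_ (e has at most one element)
    PySem.Dict.empty

-- termination argument for port A (cited by its decreasing_by)
theorem pv_dec_A (nodelimit : Int) (start end_ : String) (path : List String)
    (h1 : ¬(((path ++ [start]).length : Int) ≥ nodelimit ∧ start ≠ end_)) (h2 : ¬ start = end_) :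
    (nodelimit - (((path ++ [start]).length : Int))).toNat < (nodelimit - (path.length : Int)).toNat := by
  rw [not_and_or, not_not] at h1
  rcases h1 with h1 | h1
  · simp only [List.length_append, List.length_cons, List.length_nil] at h1 ⊢
    push_cast at h1 ⊢
    omega
  · exact absurd h1 h2

def find_paths_and_triples (lookup_table : List (String × List String)) (start : String) (end_ : String) (nodelimit : Int) (path : List String) (triples_start : List String) (triples_path : List (List String)) : List (List String) × List (List (List String)) :=
  let path1 := path ++ [start]
  let tp1 := if 0 < triples_start.length then triples_path ++ [triples_start] else triples_path
  if h1 : (path1.length : Int) ≥ nodelimit ∧ start ≠ end_ then ([], [])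
  else if h2 : start = end_ then ([path1], [tp1])
  else
    -- lookup_table['e:' + start]: KeyError when the key is missing; Pre_ excludes that
    let trs := (PySem.Dict.mk lookup_table).getD ("e:" ++ start) []
    (pvNextNodes trs start).items.foldl
      (fun acc kv =>
        if kv.1 ∉ path1 then
          let r := find_paths_and_triples lookup_table kv.1 end_ nodelimit path1 kv.2 tp1
          (acc.1 ++ r.1, acc.2 ++ r.2)
        else acc) ([], [])
termination_by (nodelimit - path.length).toNat
decreasing_by
  exact pv_dec_A nodelimit start end_ path h1 h2

-- B-side helpers: explicit-stack DFS (frames are (node, path, incoming_triples, triples_path))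
def pvTableSize (lookup_table : List (String × List String)) : Nat :=
  (lookup_table.map (fun kv => kv.2.length)).sum

-- termination measure for the stack machine: ∑ B^(nodelimit - |frame.path|)
def pvW (nodelimit : Int) (B : Nat) (st : List (String × List String × List String × List (List String))) : Nat :=
  (st.map (fun f => B ^ ((nodelimit - (f.2.1.length : Int)).toNat))).sum

-- the reversed push loop, as the list it leaves on the stack (cited by pvRun's decreasing_by and the proofs)
theorem pv_foldl_push {α β : Type} (p : α → Prop) [DecidablePred p] (f : α → β) (l : List α) (rest : List β) :
    l.foldl (fun st x => if p x then f x :: st else st) rest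
      = (l.reverse.filter (fun x => decide (p x))).map f ++ rest := by
  induction l generalizing rest with
  | nil => simp
  | cons x tl ih =>
    simp only [List.foldl_cons, ih, List.reverse_cons, List.filter_append, List.map_append]
    by_cases h : p x <;> simp [h]

theorem pv_size_nextNodes (trs : List String) (node : String) :
    (pvNextNodes trs node).items.length ≤ trs.length := by
  have h : ∀ (l : List String) (d : PySem.Dict String (List String)),
      ((l.foldl (fun d t =>
        let tem := pvParts t
        let e := PySem.Set.diff (PySem.Set.ofList [tem.getD 0 "", tem.getD 2 ""]) [node]
        match e with
        | [] => d
        | n :: _ => d.modify n [] (· ++ [t])) d).items.length ≤ d.items.length + l.length) := by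
    intro l
    induction l with
    | nil => intro d; simp
    | cons t tl ih =>
      intro d
      simp only [List.foldl_cons]
      have hstep : ∀ (n : String), ((d.modify n [] (· ++ [t])).items.length ≤ d.items.length + 1) := by
        intro n
        have hs := PySem.Dict.size_insert d n ((d.getD n []) ++ [t])
        show (d.insert n ((d.getD n []) ++ [t])).size ≤ d.size + 1
        rw [hs]; split <;> omega
      have h2 : ((match PySem.Set.diff (PySem.Set.ofList [(pvParts t).getD 0 "", (pvParts t).getD 2 ""]) [node] with
          | [] => d
          | n :: _ => d.modify n [] (· ++ [t])) : PySem.Dict String (List String)).items.length ≤ d.items.length + 1 := by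
        cases PySem.Set.diff (PySem.Set.ofList [(pvParts t).getD 0 "", (pvParts t).getD 2 ""]) [node] with
        | nil => exact Nat.le_succ _
        | cons n _ => exact hstep n
      exact le_trans (ih _) (by simp only [List.length_cons]; omega)
  have := h trs PySem.Dict.empty
  simp only [PySem.Dict.empty] at this
  simpa [pvNextNodes] using this

theorem pv_getD_le (lookup_table : List (String × List String)) (k : String) :
    ((PySem.Dict.mk lookup_table).getD k []).length ≤ pvTableSize lookup_table := by
  induction lookup_table with
  | nil => simp [PySem.Dict.getD_eq_get?_getD, pvTableSize]; rfl
  | cons kv tl ih =>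
    rw [PySem.Dict.getD_eq_get?_getD] at ih ⊢
    rw [PySem.Dict.get?_mk_cons]
    simp only [pvTableSize, List.map_cons, List.sum_cons]
    split
    · simp
    · exact le_trans ih (by simp [pvTableSize])

-- termination arguments for port B's stack machine (cited by its decreasing_by)
theorem pv_dec_pop (nodelimit : Int) (B : Nat) (hB : 0 < B)
    (f : String × List String × List String × List (List String))
    (rest : List (String × List String × List String × List (List String))) :
    pvW nodelimit B rest < pvW nodelimit B (f :: rest) := by
  simp only [pvW, List.map_cons, List.sum_cons]
  have := pow_pos hB ((nodelimit - ((f.2.1.length : Int))).toNat)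
  omega

theorem pv_dec_push (lookup_table : List (String × List String)) (node end_ : String)
    (nodelimit : Int) (p inc : List String) (tp : List (List String))
    (rest : List (String × List String × List String × List (List String)))
    (h1 : ¬(((p ++ [node]).length : Int) ≥ nodelimit ∧ node ≠ end_)) (h2 : ¬ node = end_) :
    pvW nodelimit (pvTableSize lookup_table + 2)
      (((pvNextNodes ((PySem.Dict.mk lookup_table).getD ("e:" ++ node) []) node).items.reverse).foldl
        (fun st kv => if kv.1 ∉ p ++ [node] then
            (kv.1, p ++ [node], kv.2, if 0 < inc.length then tp ++ [inc] else tp) :: st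
          else st) rest)
      < pvW nodelimit (pvTableSize lookup_table + 2) ((node, p, inc, tp) :: rest) := by
  rw [not_and_or, not_not] at h1
  rcases h1 with h1 | h1
  · rw [pv_foldl_push, List.reverse_reverse]
    simp only [pvW, List.map_append, List.sum_append, List.map_cons, List.sum_cons, List.map_map]
    set B := pvTableSize lookup_table + 2 with hB
    set nn' := pvNextNodes ((PySem.Dict.mk lookup_table).getD ("e:" ++ node) []) node with hnn
    set fl := List.filter (fun x => decide (x.1 ∉ p ++ [node])) nn'.items with hfl
    have hlen : fl.length ≤ pvTableSize lookup_table := by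
      rw [hfl]
      exact le_trans (List.length_filter_le _ _)
        (le_trans (pv_size_nextNodes _ node) (pv_getD_le _ _))
    have hlp : ((p ++ [node]).length : Int) = (p.length : Int) + 1 := by simp
    have h1' : ((p ++ [node]).length : Int) < nodelimit := by omega
    have hexp : (nodelimit - (p.length : Int)).toNat = (nodelimit - ((p ++ [node]).length : Int)).toNat + 1 := by
      rw [hlp] at *; omega
    have hsum : ((fl.map ((fun f => B ^ ((nodelimit - ((f.2.1.length : Int))).toNat)) ∘
          (fun kv => (kv.1, p ++ [node], kv.2, if 0 < inc.length then tp ++ [inc] else tp)))).sum)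
        = fl.length * B ^ ((nodelimit - (((p ++ [node]).length : Int))).toNat) := by
      rw [List.sum_eq_card_nsmul _ (B ^ ((nodelimit - (((p ++ [node]).length : Int))).toNat))]
      · simp [mul_comm]
      · intro x hx
        simp only [List.mem_map] at hx
        obtain ⟨kv, _, rfl⟩ := hx
        rfl
    rw [hsum, hexp]
    have hpow : 0 < B ^ ((nodelimit - (((p ++ [node]).length : Int))).toNat) := pow_pos (by omega) _
    have hmain : fl.length * B ^ ((nodelimit - (((p ++ [node]).length : Int))).toNat)
        < B ^ ((nodelimit - (((p ++ [node]).length : Int))).toNat + 1) := by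
      rw [pow_succ']
      calc fl.length * B ^ ((nodelimit - (((p ++ [node]).length : Int))).toNat)
          ≤ pvTableSize lookup_table * B ^ ((nodelimit - (((p ++ [node]).length : Int))).toNat) :=
            Nat.mul_le_mul_right _ hlen
        _ < B * B ^ ((nodelimit - (((p ++ [node]).length : Int))).toNat) :=
            Nat.mul_lt_mul_of_lt_of_le (by omega) le_rfl hpow
    omega
  · exact absurd h1 h2

def pvRun (lookup_table : List (String × List String)) (end_ : String) (nodelimit : Int)
    (stack : List (String × List String × List String × List (List String)))
    (acc : List (List String) × List (List (List String))) :
    List (List String) × List (List (List String)) :=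
  match stack with
  | [] => acc
  | (node, p, inc, tp) :: rest =>
    let p1 := p ++ [node]
    let tp1 := if 0 < inc.length then tp ++ [inc] else tp
    if h1 : (p1.length : Int) ≥ nodelimit ∧ node ≠ end_ then pvRun lookup_table end_ nodelimit rest acc
    else if h2 : node = end_ then
      pvRun lookup_table end_ nodelimit rest (acc.1 ++ [p1], acc.2 ++ [tp1])
    else
      -- lookup_table['e:' + node]: KeyError when the key is missing; Pre_ excludes that
      let trs := (PySem.Dict.mk lookup_table).getD ("e:" ++ node) []
      let nn := pvNextNodes trs node
      -- for n in reversed(list(next_nodes)): if n not in p: stack.append(...)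
      let newstack := nn.items.reverse.foldl
        (fun st kv => if kv.1 ∉ p1 then (kv.1, p1, kv.2, tp1) :: st else st) rest
      pvRun lookup_table end_ nodelimit newstack acc
termination_by pvW nodelimit (pvTableSize lookup_table + 2) stack
decreasing_by
  · exact pv_dec_pop nodelimit _ (by omega) (node, p, inc, tp) rest
  · exact pv_dec_pop nodelimit _ (by omega) (node, p, inc, tp) rest
  · exact pv_dec_push lookup_table node end_ nodelimit p inc tp rest h1 h2

-- ===== PORT B =====
def find_paths_and_triples_alt (lookup_table : List (String × List String)) (start : String) (end_ : String) (nodelimit : Int) (path : List String) (triples_start : List String) (triples_path : List (List String)) : List (List String) × List (List (List String)) :=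
  pvRun lookup_table end_ nodelimit [(start, path, triples_start, triples_path)] ([], [])

-- ===== PRECONDITION & SPEC =====
-- Pre_ excludes inputs on which the Python raises or its value is accidental: tables reached with a
-- malformed triple (fewer than 3 ':'-fields -> IndexError), a missing 'e:'+node key (KeyError), or a
-- triple neither of whose endpoints is its key's node (the result then depends on Python's arbitrary
-- set iteration order). It is stated over the whole table, so it is narrower than A's exact return
-- domain: it also excludes tables whose offending entry is never reached by the search.
def Pre_find_paths_and_triples (lookup_table : List (String × List String)) (start : String) (end_ : String) (nodelimit : Int) (path : List String) (triples_start : List String) (triples_path : List (List String)) : Prop :=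
  start = end_ ∨ ((path.length : Int) + 1 ≥ nodelimit) ∨
  ((∀ kv ∈ lookup_table, ∀ t ∈ kv.2,
      3 ≤ (pvParts t).length ∧
      (kv.1 = "e:" ++ (pvParts t).getD 0 "" ∨ kv.1 = "e:" ++ (pvParts t).getD 2 "")) ∧
   ("e:" ++ start) ∈ lookup_table.map Prod.fst ∧
   (∀ kv ∈ lookup_table, ∀ t ∈ kv.2,
      ("e:" ++ (pvParts t).getD 0 "") ∈ lookup_table.map Prod.fst ∧
      ("e:" ++ (pvParts t).getD 2 "") ∈ lookup_table.map Prod.fst))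

instance (lookup_table : List (String × List String)) (start : String) (end_ : String) (nodelimit : Int) (path : List String) (triples_start : List String) (triples_path : List (List String)) : Decidable (Pre_find_paths_and_triples lookup_table start end_ nodelimit path triples_start triples_path) := by unfold Pre_find_paths_and_triples; infer_instance

def pvWitness_find_paths_and_triples : (List (String × List String)) × String × String × Int × List String × List String × List (List String) :=
  ([("e:a", ["a:r:b"]), ("e:b", [])], "a", "b", 4, [], [], [])

def Spec_find_paths_and_triples (lookup_table : List (String × List String)) (start : String) (end_ : String) (nodelimit : Int) (path : List String) (triples_start : List String) (triples_path : List (List String)) (out : List (List String) × List (List (List String))) : Prop := out = find_paths_and_triples_alt lookup_table start end_ nodelimit path triples_start triples_path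
instance (lookup_table : List (String × List String)) (start : String) (end_ : String) (nodelimit : Int) (path : List String) (triples_start : List String) (triples_path : List (List String)) (out : List (List String) × List (List (List String))) : Decidable (Spec_find_paths_and_triples lookup_table start end_ nodelimit path triples_start triples_path out) := by unfold Spec_find_paths_and_triples; infer_instance

-- ===== CLAIM (what is proved, stated in full; the proofs are below) =====
def Claim_equal_find_paths_and_triples : Prop := ∀ (lookup_table : List (String × List String)) (start : String) (end_ : String) (nodelimit : Int) (path : List String) (triples_start : List String) (triples_path : List (List String)), Dom_find_paths_and_triples lookup_table start end_ nodelimit path triples_start triples_path → Pre_find_paths_and_triples lookup_table start end_ nodelimit path triples_start triples_path → Spec_find_paths_and_triples lookup_table start end_ nodelimit path triples_start triples_path (find_paths_and_triples lookup_table start end_ nodelimit path triples_start triples_path)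

-- ===== LEMMAS AND PROOFS =====
theorem pvWitness_sat : Dom_find_paths_and_triples (pvWitness_find_paths_and_triples.1) (pvWitness_find_paths_and_triples.2.1) (pvWitness_find_paths_and_triples.2.2.1) (pvWitness_find_paths_and_triples.2.2.2.1) (pvWitness_find_paths_and_triples.2.2.2.2.1) (pvWitness_find_paths_and_triples.2.2.2.2.2.1) (pvWitness_find_paths_and_triples.2.2.2.2.2.2) ∧ Pre_find_paths_and_triples (pvWitness_find_paths_and_triples.1) (pvWitness_find_paths_and_triples.2.1) (pvWitness_find_paths_and_triples.2.2.1) (pvWitness_find_paths_and_triples.2.2.2.1) (pvWitness_find_paths_and_triples.2.2.2.2.1) (pvWitness_find_paths_and_triples.2.2.2.2.2.1) (pvWitness_find_paths_and_triples.2.2.2.2.2.2) := by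
  decide

-- a fold producing a pair of append-accumulators, from a general initial pair
theorem pv_foldl_pair_init {A B C : Type} (pr : A → Prop) [DecidablePred pr]
    (f1 : A → List B) (f2 : A → List C) (l : List A) (a : List B) (b : List C) :
    l.foldl (fun acc kv => if pr kv then (acc.1 ++ f1 kv, acc.2 ++ f2 kv) else acc) (a, b)
      = (a ++ (l.foldl (fun acc kv => if pr kv then (acc.1 ++ f1 kv, acc.2 ++ f2 kv) else acc) ([], [])).1,
         b ++ (l.foldl (fun acc kv => if pr kv then (acc.1 ++ f1 kv, acc.2 ++ f2 kv) else acc) ([], [])).2) := by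
  induction l generalizing a b with
  | nil => simp
  | cons kv tl ih =>
    by_cases h : pr kv
    · simp only [List.foldl_cons, if_pos h]
      rw [ih]
      simp only [List.nil_append]
      rw [ih (f1 kv) (f2 kv)]
      simp [List.append_assoc]
    · simp only [List.foldl_cons, if_neg h]
      exact ih a b

theorem pvRun_nil (lookup_table : List (String × List String)) (end_ : String) (nodelimit : Int)
    (acc : List (List String) × List (List (List String))) :
    pvRun lookup_table end_ nodelimit [] acc = acc := by
  rw [pvRun]

-- processing one frame on top of the stack computes exactly A's recursion for that frame
theorem pvRun_cons (lookup_table : List (String × List String)) (end_ : String) (nodelimit : Int) :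
    ∀ (k : Nat) (node : String) (p inc : List String) (tp : List (List String))
      (rest : List (String × List String × List String × List (List String)))
      (acc : List (List String) × List (List (List String))),
      (nodelimit - (p.length : Int)).toNat ≤ k →
      pvRun lookup_table end_ nodelimit ((node, p, inc, tp) :: rest) acc
        = pvRun lookup_table end_ nodelimit rest
            (acc.1 ++ (find_paths_and_triples lookup_table node end_ nodelimit p inc tp).1,
             acc.2 ++ (find_paths_and_triples lookup_table node end_ nodelimit p inc tp).2) := by
  intro k
  induction k using Nat.strong_induction_on with
  | _ k IH =>
  intro node p inc tp rest acc hk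
  obtain ⟨accL, accR⟩ := acc
  rw [pvRun]
  by_cases h1 : ((p ++ [node]).length : Int) ≥ nodelimit ∧ node ≠ end_
  · rw [dif_pos h1, find_paths_and_triples, dif_pos h1]
    simp
  · by_cases h2 : node = end_
    · rw [dif_neg h1, dif_pos h2, find_paths_and_triples, dif_neg h1, dif_pos h2]
    · rw [dif_neg h1, dif_neg h2, find_paths_and_triples, dif_neg h1, dif_neg h2]
      simp only [pv_foldl_push (fun kv : String × List String => kv.1 ∉ p ++ [node]), List.reverse_reverse]
      have hlt : ((p ++ [node]).length : Int) < nodelimit := by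
        rw [not_and_or, not_not] at h1
        rcases h1 with h1 | h1
        · omega
        · exact absurd h1 h2
      have hm : (nodelimit - (((p ++ [node]).length : Int))).toNat < k := by
        simp only [List.length_append, List.length_cons, List.length_nil] at hlt ⊢
        push_cast at hlt ⊢
        omega
      have key : ∀ (l : List (String × List String))
          (rest : List (String × List String × List String × List (List String)))
          (acc : List (List String) × List (List (List String))),
          pvRun lookup_table end_ nodelimit
            ((l.filter (fun x => decide (x.1 ∉ p ++ [node]))).map
              (fun kv => (kv.1, p ++ [node], kv.2, if 0 < inc.length then tp ++ [inc] else tp)) ++ rest) acc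
            = pvRun lookup_table end_ nodelimit rest
                (l.foldl (fun acc kv =>
                  if kv.1 ∉ p ++ [node] then
                    (acc.1 ++ (find_paths_and_triples lookup_table kv.1 end_ nodelimit (p ++ [node]) kv.2
                        (if 0 < inc.length then tp ++ [inc] else tp)).1,
                     acc.2 ++ (find_paths_and_triples lookup_table kv.1 end_ nodelimit (p ++ [node]) kv.2
                        (if 0 < inc.length then tp ++ [inc] else tp)).2)
                  else acc) acc) := by
        intro l
        induction l with
        | nil => intro rest acc; simp
        | cons kv tl ihl =>
          intro rest acc
          by_cases hkv : kv.1 ∉ p ++ [node]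
          · rw [List.filter_cons_of_pos (by simpa using hkv)]
            simp only [List.map_cons, List.cons_append, List.foldl_cons, if_pos hkv]
            rw [IH _ hm kv.1 (p ++ [node]) kv.2 _ _ _ le_rfl]
            exact ihl _ _
          · rw [List.filter_cons_of_neg (by simpa using hkv)]
            simp only [List.foldl_cons, if_neg hkv]
            exact ihl _ _
      rw [key]
      rw [pv_foldl_pair_init (fun kv : String × List String => kv.1 ∉ p ++ [node])]


-- ===== VERDICT (by name: the statement is the Claim_ definition above) =====
theorem find_paths_and_triples_spec : Claim_equal_find_paths_and_triples := by
  intro lookup_table start end_ nodelimit path triples_start triples_path _dom _pre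
  unfold Spec_find_paths_and_triples find_paths_and_triples_alt
  rw [pvRun_cons lookup_table end_ nodelimit ((nodelimit - (path.length : Int)).toNat)
      start path triples_start triples_path [] ([], []) le_rfl]
  rw [pvRun_nil]
  simp
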